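-- pv_equiv track=rewrite | github.com/microsoft/CNTK | Examples/Text/BidirectionalAttentionFlow/squad/preprocess_utils.py | trim_empty
-- ===== SOURCE A (Python) =====
-- def trim_empty(tokens):
--     trimmed=[]
--     good_len=0
--     for t in tokens:
--         if t =='' and good_len==0:
--             continue
--         trimmed.append(t)
--         if t != '':
--             good_len=len(trimmed)
--     return trimmed[:good_len]
-- ===== SOURCE B (Python) =====
-- def trim_empty(tokens):
--     start = 0
--     end = len(tokens)
--     while start < end and tokens[start] == '':
--         start += 1
--     while end > start and tokens[end - 1] == '':
--         end -= 1
--     return list(tokens[start:end])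
-- ===== Notes on version B (the rewrite author's own statement) =====
-- stated objective: simpler
-- what changed: Replaces the accumulate-and-trim forward pass (building a list element by element plus a good_len marker) by two index-boundary scans from each end and a single slice.
import Mathlib
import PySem

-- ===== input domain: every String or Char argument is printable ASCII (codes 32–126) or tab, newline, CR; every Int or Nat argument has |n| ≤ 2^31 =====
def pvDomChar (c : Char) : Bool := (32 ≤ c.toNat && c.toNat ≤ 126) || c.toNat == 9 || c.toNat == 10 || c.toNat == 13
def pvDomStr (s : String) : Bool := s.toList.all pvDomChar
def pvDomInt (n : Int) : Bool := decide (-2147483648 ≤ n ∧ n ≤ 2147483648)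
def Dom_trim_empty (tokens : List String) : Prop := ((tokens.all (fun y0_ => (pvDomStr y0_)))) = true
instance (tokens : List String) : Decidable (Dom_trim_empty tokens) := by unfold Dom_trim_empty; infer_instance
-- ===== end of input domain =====

-- B replaces A's accumulate-and-trim forward pass by two index-boundary scans and one slice (objective: simpler).

-- ===== PORT A =====
-- for t in tokens: skip leading '', append, remember length after last non-empty; return trimmed[:good_len]
def trim_empty (tokens : List String) : List String :=
  let st := tokens.foldl (fun (st : List String × Nat) t =>
    if t = "" ∧ st.2 = 0 then st
    else
      let trimmed := st.1 ++ [t]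
      (trimmed, if t ≠ "" then trimmed.length else st.2)) ([], 0)
  -- trimmed[:good_len]: good_len is a Nat with good_len ≤ len(trimmed), so the slice is `take`
  st.1.take st.2

-- ===== PORT B =====
-- while start < end and tokens[start] == '': start += 1     (start, end are the Python loop indices;
-- tokens[start] is always in range here, so List.getD is exact)
def findStart (tokens : List String) (start : Nat) : Nat :=
  if start < tokens.length ∧ tokens.getD start "" = "" then findStart tokens (start + 1)
  else start
termination_by tokens.length - start

-- while end > start and tokens[end - 1] == '': end -= 1
def findEnd (tokens : List String) (start e : Nat) : Nat :=
  if start < e ∧ tokens.getD (e - 1) "" = "" then findEnd tokens start (e - 1)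
  else e
termination_by e

def trim_empty_alt (tokens : List String) : List String :=
  let s := findStart tokens 0
  let e := findEnd tokens s tokens.length
  -- list(tokens[s:e]) with 0 ≤ s ≤ e ≤ len(tokens): drop then take
  (tokens.drop s).take (e - s)

-- ===== PRECONDITION & SPEC =====
def Spec_trim_empty (tokens : List String) (out : List String) : Prop := out = trim_empty_alt tokens
instance (tokens : List String) (out : List String) : Decidable (Spec_trim_empty tokens out) := by unfold Spec_trim_empty; infer_instance

-- ===== CLAIM =====
def Claim_equal_trim_empty : Prop := ∀ (tokens : List String), Dom_trim_empty tokens → Spec_trim_empty tokens (trim_empty tokens)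

-- ===== LEMMAS AND PROOFS =====

-- the canonical value both programs compute: drop leading '' tokens, then drop trailing '' tokens
def trimR (l : List String) : List String := (l.reverse.dropWhile (· == "")).reverse
def canon (l : List String) : List String := trimR (l.dropWhile (· == ""))

theorem trimR_prefix (l : List String) : trimR l <+: l := by
  obtain ⟨t, ht⟩ := List.dropWhile_suffix (l := l.reverse) (· == "")
  refine ⟨t.reverse, ?_⟩
  have := congrArg List.reverse ht
  simpa [trimR] using this

theorem take_length_trimR (l : List String) : l.take (trimR l).length = trimR l :=
  (List.prefix_iff_eq_take.mp (trimR_prefix l)).symm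

theorem trimR_append_empty (l : List String) : trimR (l ++ [""]) = trimR l := by
  simp [trimR]

theorem trimR_append_nonempty (l : List String) (t : String) (ht : t ≠ "") :
    trimR (l ++ [t]) = l ++ [t] := by
  simp [trimR, ht]

-- A-side step function
def stepA (st : List String × Nat) (t : String) : List String × Nat :=
  if t = "" ∧ st.2 = 0 then st
  else
    let trimmed := st.1 ++ [t]
    (trimmed, if t ≠ "" then trimmed.length else st.2)

theorem foldA_skip (l : List String) :
    l.foldl stepA ([], 0) = (l.dropWhile (· == "")).foldl stepA ([], 0) := by
  induction l with
  | nil => rfl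
  | cons h t ih =>
    by_cases hh : h = ""
    · simpa [List.foldl, stepA, hh, List.dropWhile] using ih
    · have hh2 : (h == "") = false := by simpa using hh
      simp [List.dropWhile, hh2]

theorem foldA_inv (l acc : List String) (hne : trimR acc ≠ []) :
    l.foldl stepA (acc, (trimR acc).length) = (acc ++ l, (trimR (acc ++ l)).length) := by
  induction l generalizing acc with
  | nil => simp
  | cons t ts ih =>
    have hg : (trimR acc).length ≠ 0 := by simpa using hne
    by_cases ht : t = ""
    · have hstep : stepA (acc, (trimR acc).length) t = (acc ++ [t], (trimR acc).length) := by
        simp [stepA, ht, hg]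
      have htr : trimR (acc ++ [t]) = trimR acc := by rw [ht]; exact trimR_append_empty acc
      have hne' : trimR (acc ++ [t]) ≠ [] := by rw [htr]; exact hne
      calc (t :: ts).foldl stepA (acc, (trimR acc).length)
          = ts.foldl stepA (acc ++ [t], (trimR (acc ++ [t])).length) := by
            rw [List.foldl_cons, hstep, htr]
        _ = (acc ++ [t] ++ ts, (trimR (acc ++ [t] ++ ts)).length) := ih _ hne'
        _ = (acc ++ t :: ts, (trimR (acc ++ t :: ts)).length) := by simp
    · have hstep : stepA (acc, (trimR acc).length) t = (acc ++ [t], (acc ++ [t]).length) := by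
        simp [stepA, ht]
      have htr : trimR (acc ++ [t]) = acc ++ [t] := trimR_append_nonempty acc t ht
      have hne' : trimR (acc ++ [t]) ≠ [] := by rw [htr]; simp
      calc (t :: ts).foldl stepA (acc, (trimR acc).length)
          = ts.foldl stepA (acc ++ [t], (trimR (acc ++ [t])).length) := by
            rw [List.foldl_cons, hstep, htr]
        _ = (acc ++ [t] ++ ts, (trimR (acc ++ [t] ++ ts)).length) := ih _ hne'
        _ = (acc ++ t :: ts, (trimR (acc ++ t :: ts)).length) := by simp

theorem trim_empty_eq_canon (tokens : List String) : trim_empty tokens = canon tokens := by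
  show (tokens.foldl stepA ([], 0)).1.take (tokens.foldl stepA ([], 0)).2 = canon tokens
  rw [foldA_skip]
  rcases hd : tokens.dropWhile (· == "") with _ | ⟨h, t⟩
  · simp [canon, hd, trimR]
  · have hnil : tokens.dropWhile (· == "") ≠ [] := by rw [hd]; simp
    have hh : (h == "") = false := by
      simpa [hd] using List.head_dropWhile_not (· == "") hnil
    have hh' : h ≠ "" := by simpa using hh
    have h1 : stepA ([], 0) h = ([h], 1) := by simp [stepA, hh']
    have htr1 : trimR [h] = [h] := by simpa using trimR_append_nonempty [] h hh'
    have := foldA_inv t [h] (by rw [htr1]; simp)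
    rw [List.foldl_cons, h1]
    have h1' : ([h], 1) = (([h] : List String), (trimR [h]).length) := by simp [htr1]
    rw [h1', this]
    simp only [canon, hd]
    exact take_length_trimR (h :: t)

-- B-side lemmas
theorem drop_takeWhile_length (l : List String) :
    l.drop (l.takeWhile (· == "")).length = l.dropWhile (· == "") := by
  induction l with
  | nil => rfl
  | cons h t ih =>
    by_cases hh : h = ""
    · simpa [List.takeWhile, List.dropWhile, hh] using ih
    · have hh2 : (h == "") = false := by simpa using hh
      simp [List.takeWhile, List.dropWhile, hh2]

theorem findStart_char (l : List String) (i : Nat) :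
    findStart l i = i + ((l.drop i).takeWhile (· == "")).length := by
  fun_induction findStart l i with
  | case1 i h ih =>
    obtain ⟨hi, he⟩ := h
    have hdrop : l.drop i = l[i] :: l.drop (i + 1) := List.drop_eq_getElem_cons hi
    have hgd : l[i] = "" := by rwa [List.getD_eq_getElem l "" hi] at he
    rw [ih, hdrop, hgd]
    simp [List.takeWhile]
    omega
  | case2 i h =>
    rcases Nat.lt_or_ge i l.length with hi | hi
    · have hgd : l[i] ≠ "" := by
        intro hc; exact h ⟨hi, by rwa [List.getD_eq_getElem l "" hi]⟩
      have hdrop : l.drop i = l[i] :: l.drop (i + 1) := List.drop_eq_getElem_cons hi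
      have hgd2 : (l[i] == "") = false := by simpa using hgd
      rw [hdrop]; simp [List.takeWhile, hgd2]
    · rw [List.drop_eq_nil_of_le hi]; simp

theorem findEnd_char (l : List String) (s : Nat) :
    ∀ e, s ≤ e → e ≤ l.length →
      findEnd l s e = s + (trimR ((l.drop s).take (e - s))).length := by
  intro e
  fun_induction findEnd l s e with
  | case1 e h ih =>
    intro _ hle
    obtain ⟨hse, he⟩ := h
    have hi : e - 1 < l.length := by omega
    have hgd : l[e-1] = "" := by rwa [List.getD_eq_getElem l "" hi] at he
    have hsplit : (l.drop s).take (e - s) = (l.drop s).take (e - 1 - s) ++ [l[e-1]] := by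
      have h1 : (l.drop s).take (e - s) = (l.drop s).take (e - 1 - s + 1) := by
        congr 1; omega
      rw [h1, List.take_add_one]
      congr 1
      have hlen : e - 1 - s < (l.drop s).length := by simp; omega
      rw [List.getElem?_eq_getElem hlen]
      simp [List.getElem_drop]
      congr 1; omega
    rw [ih (by omega) (by omega), hsplit, hgd, trimR_append_empty]
  | case2 e h =>
    intro hse hle
    rcases Nat.eq_or_lt_of_le hse with heq | hlt
    · simp [← heq, trimR]
    · have he : l.getD (e-1) "" ≠ "" := fun hc => h ⟨hlt, hc⟩
      have hi : e - 1 < l.length := by omega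
      have hgd : l[e-1] ≠ "" := by rwa [List.getD_eq_getElem l "" hi] at he
      have hsplit : (l.drop s).take (e - s) = (l.drop s).take (e - 1 - s) ++ [l[e-1]] := by
        have h1 : (l.drop s).take (e - s) = (l.drop s).take (e - 1 - s + 1) := by
          congr 1; omega
        rw [h1, List.take_add_one]
        congr 1
        have hlen : e - 1 - s < (l.drop s).length := by simp; omega
        rw [List.getElem?_eq_getElem hlen]
        simp [List.getElem_drop]
        congr 1; omega
      rw [hsplit, trimR_append_nonempty _ _ hgd]
      simp
      omega

theorem trim_empty_alt_eq_canon (tokens : List String) : trim_empty_alt tokens = canon tokens := by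
  show (tokens.drop (findStart tokens 0)).take (findEnd tokens (findStart tokens 0) tokens.length - findStart tokens 0) = canon tokens
  have hs : findStart tokens 0 = (tokens.takeWhile (· == "")).length := by
    simpa using findStart_char tokens 0
  have hsle : (tokens.takeWhile (· == "")).length ≤ tokens.length :=
    (List.takeWhile_prefix _).length_le
  have hdrop : tokens.drop (findStart tokens 0) = tokens.dropWhile (· == "") := by
    rw [hs]; exact drop_takeWhile_length tokens
  have he := findEnd_char tokens (findStart tokens 0) tokens.length (by rw [hs]; exact hsle) le_rfl
  rw [hdrop] at he
  have hfull : (tokens.dropWhile (· == "")).take (tokens.length - findStart tokens 0)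
      = tokens.dropWhile (· == "") := by
    apply List.take_of_length_le
    rw [← hdrop]
    simp
  rw [hfull] at he
  rw [he, hdrop, Nat.add_sub_cancel_left]
  exact take_length_trimR _

-- ===== VERDICT =====
theorem trim_empty_spec : Claim_equal_trim_empty := by
  intro tokens _
  show trim_empty tokens = trim_empty_alt tokens
  rw [trim_empty_eq_canon, trim_empty_alt_eq_canon]
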